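-- pv_equiv track=rewrite | github.com/GuSt4v0CCAM4/CifradoSimetrico | cifrado_polybios.py | descifrar_polybios
-- ===== SOURCE A (Python) =====
-- def descifrar_polybios(mensaje_cifrado):
--     alfabeto = 'ABCDEFGHIKLMNOPQRSTUVWXYZ'
--     matriz_inversa = {(i // 5 + 1, i % 5 + 1): alfabeto[i] for i in range(len(alfabeto))}
--     mensaje_descifrado = ''
--     i = 0
--
--     while i < len(mensaje_cifrado):
--         if mensaje_cifrado[i].isdigit() and i + 1 < len(mensaje_cifrado) and mensaje_cifrado[i + 1].isdigit():
--             fila = int(mensaje_cifrado[i])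
--             columna = int(mensaje_cifrado[i + 1])
--             if (fila, columna) in matriz_inversa:
--                 mensaje_descifrado += matriz_inversa[(fila, columna)]
--             else:
--                 mensaje_descifrado += '?'
--             i += 2
--         else:
--             mensaje_descifrado += mensaje_cifrado[i]
--             i += 1
--
--     return mensaje_descifrado
-- ===== SOURCE B (Python) =====
-- def descifrar_polybios(mensaje_cifrado):
--     alfabeto = 'ABCDEFGHIKLMNOPQRSTUVWXYZ'
--     stack = list(reversed(mensaje_cifrado))
--     out = []
--     while stack:
--         c = stack.pop()
--         if c.isdigit() and stack and stack[-1].isdigit():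
--             d = stack.pop()
--             f = int(c) - 1
--             col = int(d) - 1
--             out.append(alfabeto[f * 5 + col] if 0 <= f < 5 and 0 <= col < 5 else '?')
--         else:
--             out.append(c)
--     return ''.join(out)
-- ===== Notes on version B (the rewrite author's own statement) =====
-- stated objective: faster
-- what changed: Replaces A's dict-comprehension lookup table and index-based while scan with quadratic string += accumulation by a stack consumed from the top (pop-driven loop over the reversed char list), a closed-form arithmetic decode of each digit pair, and a joined output list.
import Mathlib
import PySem

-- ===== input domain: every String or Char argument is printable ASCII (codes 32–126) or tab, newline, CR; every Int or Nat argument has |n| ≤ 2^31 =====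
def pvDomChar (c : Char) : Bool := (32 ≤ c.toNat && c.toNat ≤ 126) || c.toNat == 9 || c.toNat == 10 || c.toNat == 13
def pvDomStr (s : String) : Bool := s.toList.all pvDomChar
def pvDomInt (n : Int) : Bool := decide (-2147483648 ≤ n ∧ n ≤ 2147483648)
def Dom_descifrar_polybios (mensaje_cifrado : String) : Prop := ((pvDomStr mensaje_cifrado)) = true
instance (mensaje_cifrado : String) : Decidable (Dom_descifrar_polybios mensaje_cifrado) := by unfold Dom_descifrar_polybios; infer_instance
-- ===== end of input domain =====

-- B replaces A's dict-driven index/while scan (with quadratic string += accumulation) by a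
-- stack (structural) consumption of the characters with a closed-form letter computation and
-- a joined output list; measured faster in a timing run.

-- ===== PORT A =====
-- alfabeto = 'ABCDEFGHIKLMNOPQRSTUVWXYZ'
def pvAlfabeto : List Char := "ABCDEFGHIKLMNOPQRSTUVWXYZ".toList

-- matriz_inversa = {(i // 5 + 1, i % 5 + 1): alfabeto[i] for i in range(len(alfabeto))}
-- (alfabeto[i] is always in range here, so pyGetD is exact)
def pvMatrizInversa : PySem.Dict (Int × Int) Char :=
  (PySem.List.pyRange 0 25 1).foldl
    (fun d i => d.insert (PySem.Int.floordiv i 5 + 1, PySem.Int.mod i 5 + 1)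
                         (PySem.List.pyGetD pvAlfabeto i ' '))
    PySem.Dict.empty

-- the while loop of A; i is the scan index, acc the accumulated mensaje_descifrado.
-- int(c) for a single digit char is exactly its code point minus 48 (exact under the guard);
-- '(fila, columna) in matriz_inversa' + 'matriz_inversa[(fila, columna)]' ≙ the get? match.
def pvLoopA (s : List Char) (acc : List Char) (i : Nat) : List Char :=
  if h : i < s.length then
    let c := s[i]
    if PySem.Chars.isdigit c && decide (i + 1 < s.length)
        && PySem.Chars.isdigit (PySem.List.pyGetD s ((i : Int) + 1) ' ') then
      let fila : Int := (c.toNat : Int) - 48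
      let columna : Int := ((PySem.List.pyGetD s ((i : Int) + 1) ' ').toNat : Int) - 48
      let l : Char := match pvMatrizInversa.get? (fila, columna) with
        | some l => l
        | none   => '?'
      pvLoopA s (acc ++ [l]) (i + 2)
    else
      pvLoopA s (acc ++ [c]) (i + 1)
  else acc
termination_by s.length - i

def descifrar_polybios (mensaje_cifrado : String) : String :=
  String.ofList (pvLoopA mensaje_cifrado.toList [] 0)

-- ===== PORT B =====
-- decode of one digit pair: closed-form index into the alphabet (Source B's conditional expression)
def pvDecodePair (c d : Char) : Char :=
  let f : Int := (c.toNat : Int) - 48 - 1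
  let col : Int := (d.toNat : Int) - 48 - 1
  if 0 ≤ f ∧ f < 5 ∧ 0 ≤ col ∧ col < 5 then PySem.List.pyGetD pvAlfabeto (f * 5 + col) '?' else '?'

-- Source B's while loop pops from the reversed-string stack: the stack top is the list head,
-- so the loop is structural recursion on the remaining characters; out.append ≙ cons
def pvLoopB : List Char → List Char
  | [] => []
  | c :: rest =>
    if PySem.Chars.isdigit c then
      match rest with
      | d :: rest2 =>
        if PySem.Chars.isdigit d then pvDecodePair c d :: pvLoopB rest2
        else c :: pvLoopB (d :: rest2)
      | [] => [c]
    else c :: pvLoopB rest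

def descifrar_polybios_alt (mensaje_cifrado : String) : String :=
  String.ofList (pvLoopB mensaje_cifrado.toList)

-- ===== PRECONDITION & SPEC =====
def Spec_descifrar_polybios (mensaje_cifrado : String) (out : String) : Prop := out = descifrar_polybios_alt mensaje_cifrado
instance (mensaje_cifrado : String) (out : String) : Decidable (Spec_descifrar_polybios mensaje_cifrado out) := by unfold Spec_descifrar_polybios; infer_instance

-- ===== CLAIM (what is proved, stated in full; the proofs are below) =====
def Claim_equal_descifrar_polybios : Prop := ∀ (mensaje_cifrado : String), Dom_descifrar_polybios mensaje_cifrado → Spec_descifrar_polybios mensaje_cifrado (descifrar_polybios mensaje_cifrado)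

-- ===== LEMMAS AND PROOFS =====

-- a char accepted by Python's isdigit on the ASCII domain is one of the ten digits
theorem pv_digit_cases (c : Char) (h : PySem.Chars.isdigit c = true) :
    c = '0' ∨ c = '1' ∨ c = '2' ∨ c = '3' ∨ c = '4' ∨ c = '5' ∨ c = '6' ∨ c = '7' ∨ c = '8' ∨ c = '9' := by
  simp only [PySem.Chars.isdigit, Bool.and_eq_true, decide_eq_true_eq, Char.le_def,
    UInt32.le_iff_toNat_le] at h
  have hv : c.toNat = 48 ∨ c.toNat = 49 ∨ c.toNat = 50 ∨ c.toNat = 51 ∨ c.toNat = 52 ∨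
      c.toNat = 53 ∨ c.toNat = 54 ∨ c.toNat = 55 ∨ c.toNat = 56 ∨ c.toNat = 57 := by
    unfold Char.toNat
    have h0 : ('0').val.toNat = 48 := rfl
    have h9 : ('9').val.toNat = 57 := rfl
    omega
  have conv : ∀ (n : Nat) (d : Char), c.toNat = n → d.toNat = n → c = d := by
    intro n d h1 h2
    exact Char.ext (UInt32.toNat_inj.mp (h1.trans h2.symm))
  rcases hv with hv|hv|hv|hv|hv|hv|hv|hv|hv|hv
  · exact Or.inl (conv _ '0' hv rfl)
  · exact Or.inr (Or.inl (conv _ '1' hv rfl))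
  · exact Or.inr (Or.inr (Or.inl (conv _ '2' hv rfl)))
  · exact Or.inr (Or.inr (Or.inr (Or.inl (conv _ '3' hv rfl))))
  · exact Or.inr (Or.inr (Or.inr (Or.inr (Or.inl (conv _ '4' hv rfl)))))
  · exact Or.inr (Or.inr (Or.inr (Or.inr (Or.inr (Or.inl (conv _ '5' hv rfl))))))
  · exact Or.inr (Or.inr (Or.inr (Or.inr (Or.inr (Or.inr (Or.inl (conv _ '6' hv rfl)))))))
  · exact Or.inr (Or.inr (Or.inr (Or.inr (Or.inr (Or.inr (Or.inr (Or.inl (conv _ '7' hv rfl))))))))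
  · exact Or.inr (Or.inr (Or.inr (Or.inr (Or.inr (Or.inr (Or.inr (Or.inr (Or.inl (conv _ '8' hv rfl)))))))))
  · exact Or.inr (Or.inr (Or.inr (Or.inr (Or.inr (Or.inr (Or.inr (Or.inr (Or.inr (conv _ '9' hv rfl)))))))))

-- A's dict lookup on a digit pair equals B's closed-form decode (checked over the 100 pairs)
theorem pv_step_eq (c d : Char) (hc : PySem.Chars.isdigit c = true) (hd : PySem.Chars.isdigit d = true) :
    (match pvMatrizInversa.get? (((c.toNat : Int) - 48, (d.toNat : Int) - 48)) with
      | some l => l | none => '?') = pvDecodePair c d := by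
  rcases pv_digit_cases c hc with rfl|rfl|rfl|rfl|rfl|rfl|rfl|rfl|rfl|rfl <;>
    rcases pv_digit_cases d hd with rfl|rfl|rfl|rfl|rfl|rfl|rfl|rfl|rfl|rfl <;> decide

theorem pv_getD_succ (s : List Char) (i : Nat) :
    PySem.List.pyGetD s ((i : Int) + 1) ' ' = s.getD (i + 1) ' ' := by
  have : ((i : Int) + 1) = ((i + 1 : Nat) : Int) := by push_cast; ring
  rw [this, PySem.List.pyGetD_natCast]

theorem pvLoopA_eq (s : List Char) (i : Nat) (acc : List Char) :
    pvLoopA s acc i = acc ++ pvLoopB (s.drop i) := by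
  suffices H : ∀ n i acc, s.length - i ≤ n → pvLoopA s acc i = acc ++ pvLoopB (s.drop i) from
    H (s.length - i) i acc le_rfl
  intro n
  induction n with
  | zero =>
    intro i acc hb
    rw [pvLoopA]
    have hni : ¬ i < s.length := by omega
    rw [dif_neg hni, List.drop_eq_nil_of_le (by omega)]
    simp [pvLoopB]
  | succ n ih =>
    intro i acc hb
    rw [pvLoopA]
    by_cases hi : i < s.length
    · rw [dif_pos hi]
      have hdrop : s.drop i = s[i] :: s.drop (i + 1) := List.drop_eq_getElem_cons hi
      by_cases hc : PySem.Chars.isdigit s[i] = true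
      · by_cases hi1 : i + 1 < s.length
        · have hget : PySem.List.pyGetD s ((i : Int) + 1) ' ' = s[i + 1] := by
            rw [pv_getD_succ, List.getD_eq_getElem s ' ' hi1]
          have hdrop1 : s.drop (i + 1) = s[i + 1] :: s.drop (i + 2) := List.drop_eq_getElem_cons hi1
          by_cases hd : PySem.Chars.isdigit s[i + 1] = true
          · -- digit pair: both sides decode it
            simp only [hget, hc, hd, hi1, decide_true, Bool.and_self, if_true]
            rw [ih (i + 2) _ (by omega), pv_step_eq s[i] s[i + 1] hc hd,
              hdrop, hdrop1, pvLoopB]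
            simp [hc, hd]
          · -- digit followed by a non-digit: both sides copy the digit
            simp only [hget, hc, hd, Bool.true_and, Bool.and_false, if_neg, Bool.false_eq_true,
              not_false_eq_true]
            rw [ih (i + 1) _ (by omega), hdrop, hdrop1]
            simp [pvLoopB, hc, hd]
        · -- trailing lone digit
          have hcond : decide (i + 1 < s.length) = false := by simp [hi1]
          simp only [hcond, Bool.and_false, Bool.false_and, if_neg, Bool.false_eq_true,
            not_false_eq_true]
          rw [ih (i + 1) _ (by omega), hdrop, List.drop_eq_nil_of_le (by omega)]
          simp [pvLoopB, hc]
      · -- non-digit: copied verbatim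
        simp only [hc, Bool.false_and, if_neg, Bool.false_eq_true, not_false_eq_true]
        rw [ih (i + 1) _ (by omega)]
        conv_rhs => rw [hdrop, pvLoopB.eq_def]
        simp [hc]
    · rw [dif_neg hi, List.drop_eq_nil_of_le (by omega)]
      simp [pvLoopB]

-- ===== VERDICT (by name: the statement is the Claim_ definition above) =====
theorem descifrar_polybios_spec : Claim_equal_descifrar_polybios := by
  intro s _
  unfold Spec_descifrar_polybios descifrar_polybios descifrar_polybios_alt
  rw [pvLoopA_eq]
  simp
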